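-- pv_equiv track=rewrite | github.com/casilllasRd/AdventOfCode2023 | day10-19/day14/solution1.py | calculate_total_load
-- ===== SOURCE A (Python) =====
-- def calculate_total_load(dish_transposed: list[str], total_rows) -> int:
--     EMPTY_SPOT: str = "."
--     SQUARE_STONE: str = "#"
--     total_load: int = 0
--
--     for column in dish_transposed:
--         for row_index, element in enumerate(column):
--             if element == EMPTY_SPOT or element == SQUARE_STONE: continue
--             total_load += calculate_stone_load(column, total_rows, row_index, EMPTY_SPOT, SQUARE_STONE)
--
--     return total_load
--
-- def calculate_stone_load(column: str, total_rows: int, row_index: int, empty_spot: str, square_stone: str) -> int: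
--     stone_load: int = total_rows - row_index
--     elements_above: str = column[:row_index][::-1]
--
--     for element in elements_above:
--         if element == empty_spot: stone_load += 1
--         elif element == square_stone: break
--
--     return stone_load
-- ===== SOURCE B (Python) =====
-- def calculate_total_load(dish_transposed: list[str], total_rows) -> int:
--     # One pass per column: `slot` is the load value the next round stone will
--     # take after rolling north (reset below each square stone), `cur` is the
--     # load value of the current row.
--     total = 0
--     for column in dish_transposed:
--         cur = total_rows
--         slot = total_rows
--         for ch in column:
--             if ch == "#":
--                 slot = cur - 1
--             elif ch != ".":
--                 total += slot
--                 slot -= 1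
--             cur -= 1
--     return total
-- ===== Notes on version B (the rewrite author's own statement) =====
-- stated objective: faster
-- what changed: Replaces the per-stone backward rescan of everything above (slice+reverse+loop for each stone) with a single forward pass per column that tracks the next landing load after the last square stone.
import Mathlib
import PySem

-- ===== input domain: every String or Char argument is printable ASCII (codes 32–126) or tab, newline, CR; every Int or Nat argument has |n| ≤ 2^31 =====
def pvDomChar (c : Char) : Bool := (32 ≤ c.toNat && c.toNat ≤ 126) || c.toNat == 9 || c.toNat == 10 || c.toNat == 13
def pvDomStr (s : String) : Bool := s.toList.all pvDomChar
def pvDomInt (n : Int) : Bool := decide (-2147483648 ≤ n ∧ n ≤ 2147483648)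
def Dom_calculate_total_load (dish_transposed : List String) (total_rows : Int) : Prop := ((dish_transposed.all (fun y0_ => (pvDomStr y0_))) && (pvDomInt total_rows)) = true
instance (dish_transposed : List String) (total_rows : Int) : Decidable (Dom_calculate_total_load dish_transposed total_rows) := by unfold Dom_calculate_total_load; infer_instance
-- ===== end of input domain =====

-- B is a one-pass-per-column rewrite of A (tracks the next landing load instead of
-- rescanning everything above each stone); equivalence proved on all inputs.

-- ===== PORT A =====
-- the `for element in elements_above` loop of calculate_stone_load (break on '#')
def pvLoopA : List Char → Int → Int
  | [], stone_load => stone_load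
  | e :: rest, stone_load =>
    if e = '.' then pvLoopA rest (stone_load + 1)
    else if e = '#' then stone_load
    else pvLoopA rest stone_load

-- column[:row_index][::-1] ported as slice + List.reverse (s[::-1] is exactly reverse)
def calculate_stone_load (column : List Char) (total_rows : Int) (row_index : Int) : Int :=
  pvLoopA (PySem.List.slice column none (some row_index)).reverse (total_rows - row_index)

def calculate_total_load (dish_transposed : List String) (total_rows : Int) : Int :=
  dish_transposed.foldl (fun total_load column =>
    (PySem.List.enumerate column.toList 0).foldl
      (fun t p =>
        if p.2 = '.' ∨ p.2 = '#' then t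
        else t + calculate_stone_load column.toList total_rows p.1) total_load) 0

-- ===== PORT B =====
-- per-character step of Source B's inner loop; state = (cur, slot, total)
def pvBStep (st : Int × Int × Int) (ch : Char) : Int × Int × Int :=
  if ch = '#' then (st.1 - 1, st.1 - 1, st.2.2)
  else if ch ≠ '.' then (st.1 - 1, st.2.1 - 1, st.2.2 + st.2.1)
  else (st.1 - 1, st.2.1, st.2.2)

def calculate_total_load_alt (dish_transposed : List String) (total_rows : Int) : Int :=
  dish_transposed.foldl (fun total column =>
    (column.toList.foldl pvBStep (total_rows, total_rows, total)).2.2) 0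

-- ===== PRECONDITION & SPEC =====
def Spec_calculate_total_load (dish_transposed : List String) (total_rows : Int) (out : Int) : Prop := out = calculate_total_load_alt dish_transposed total_rows
instance (dish_transposed : List String) (total_rows : Int) (out : Int) : Decidable (Spec_calculate_total_load dish_transposed total_rows out) := by unfold Spec_calculate_total_load; infer_instance

-- ===== CLAIM (what is proved, stated in full; the proofs are below) =====
def Claim_equal_calculate_total_load : Prop := ∀ (dish_transposed : List String) (total_rows : Int), Dom_calculate_total_load dish_transposed total_rows → Spec_calculate_total_load dish_transposed total_rows (calculate_total_load dish_transposed total_rows)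

-- ===== LEMMAS AND PROOFS =====

-- number of '.' above a position, scanning upward, stopping at the first '#'
def pvDots : List Char → Int
  | [] => 0
  | c :: rest => if c = '.' then 1 + pvDots rest else if c = '#' then 0 else pvDots rest

theorem pvLoopA_eq (l : List Char) : ∀ acc : Int, pvLoopA l acc = acc + pvDots l := by
  induction l with
  | nil => intro acc; simp [pvLoopA, pvDots]
  | cons c rest ih =>
    intro acc
    by_cases h1 : c = '.'
    · simp [pvLoopA, pvDots, h1, ih]; ring
    · by_cases h2 : c = '#'
      · simp [pvLoopA, pvDots, h2]
      · simp [pvLoopA, pvDots, h1, h2, ih]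

theorem pvStone_eq (prefR rest : List Char) (tr : Int) :
    calculate_stone_load (prefR.reverse ++ rest) tr (prefR.length : Int)
      = tr - prefR.length + pvDots prefR := by
  unfold calculate_stone_load
  have hlen : prefR.length = prefR.reverse.length := by simp
  rw [hlen, PySem.List.slice_to_natCast]
  simp [pvLoopA_eq]

theorem pvCol_eq (rest : List Char) : ∀ (prefR : List Char) (tr t : Int),
    (PySem.List.enumerate rest (prefR.length : Int)).foldl
      (fun t p =>
        if p.2 = '.' ∨ p.2 = '#' then t
        else t + calculate_stone_load (prefR.reverse ++ rest) tr p.1) t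
    = (rest.foldl pvBStep (tr - prefR.length, tr - prefR.length + pvDots prefR, t)).2.2 := by
  induction rest with
  | nil => intro prefR tr t; simp [PySem.List.enumerate_nil]
  | cons c rest ih =>
    intro prefR tr t
    have hcol : prefR.reverse ++ c :: rest = (c :: prefR).reverse ++ rest := by simp
    have hkey := ih (c :: prefR) tr
    rw [PySem.List.enumerate_cons]
    simp only [List.foldl_cons, hcol]
    have hlen : ((prefR.length : Int) + 1) = ((c :: prefR).length : Int) := by
      simp [List.length_cons]
    rw [hlen]
    by_cases h1 : c = '.'
    · rw [if_pos (Or.inl h1), hkey t]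
      have hS : pvBStep (tr - prefR.length, tr - prefR.length + pvDots prefR, t) c
          = (tr - ((c :: prefR).length : Int),
             tr - ((c :: prefR).length : Int) + pvDots (c :: prefR), t) := by
        simp [pvBStep, h1, pvDots, Prod.ext_iff]
        omega
      rw [hS]
    · by_cases h2 : c = '#'
      · rw [if_pos (Or.inr h2), hkey t]
        have hS : pvBStep (tr - prefR.length, tr - prefR.length + pvDots prefR, t) c
            = (tr - ((c :: prefR).length : Int),
               tr - ((c :: prefR).length : Int) + pvDots (c :: prefR), t) := by
          simp [pvBStep, h2, pvDots, Prod.ext_iff]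
          omega
        rw [hS]
      · have hst := pvStone_eq prefR (c :: rest) tr
        rw [hcol] at hst
        rw [if_neg (not_or.mpr ⟨h1, h2⟩), hst,
            hkey (t + (tr - prefR.length + pvDots prefR))]
        have hS : pvBStep (tr - prefR.length, tr - prefR.length + pvDots prefR, t) c
            = (tr - ((c :: prefR).length : Int),
               tr - ((c :: prefR).length : Int) + pvDots (c :: prefR),
               t + (tr - prefR.length + pvDots prefR)) := by
          simp [pvBStep, h1, h2, pvDots, Prod.ext_iff]
          omega
        rw [hS]

-- ===== VERDICT (by name: the statement is the Claim_ definition above) =====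
theorem calculate_total_load_spec : Claim_equal_calculate_total_load := by
  intro dish tr _
  unfold Spec_calculate_total_load calculate_total_load calculate_total_load_alt
  congr 1
  funext total column
  have := pvCol_eq column.toList [] tr total
  simpa [pvDots] using this
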